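-- pv_equiv track=rewrite | github.com/afsana158/SkillScan | nlp/nlp.py | extract_projects
-- ===== SOURCE A (Python) =====
-- from typing import Dict, List
--
-- def extract_projects(section: str) -> List[Dict]:
--     result = []
--     lines = [l.strip() for l in section.splitlines() if l.strip()]
--     current = None
--     for l in lines:
--         if len(l.split()) <= 10:
--             result.append({"title": l, "description": ""})
--             current = result[-1]
--         elif current:
--             current["description"] += " " + l
--     return result
-- ===== SOURCE B (Python) =====
-- from typing import Dict, List
--
-- def extract_projects(section: str) -> List[Dict]:
--     lines = [l.strip() for l in section.splitlines() if l.strip()]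
--     n = len(lines)
--     i = 0
--     # skip any long lines before the first title
--     while i < n and len(lines[i].split()) > 10:
--         i += 1
--     result = []
--     while i < n:
--         title = lines[i]
--         i += 1
--         parts = []
--         while i < n and len(lines[i].split()) > 10:
--             parts.append(lines[i])
--             i += 1
--         desc = (" " + " ".join(parts)) if parts else ""
--         result.append({"title": title, "description": desc})
--     return result
-- ===== Notes on version B (the rewrite author's own statement) =====
-- stated objective: alternative
-- what changed: B segments the cleaned lines by title positions (skip pre-title lines, then repeatedly take a title plus the span of following long lines and join them once) instead of A's stateful pass that mutates the 'current' dict's description in place.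
import Mathlib
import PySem

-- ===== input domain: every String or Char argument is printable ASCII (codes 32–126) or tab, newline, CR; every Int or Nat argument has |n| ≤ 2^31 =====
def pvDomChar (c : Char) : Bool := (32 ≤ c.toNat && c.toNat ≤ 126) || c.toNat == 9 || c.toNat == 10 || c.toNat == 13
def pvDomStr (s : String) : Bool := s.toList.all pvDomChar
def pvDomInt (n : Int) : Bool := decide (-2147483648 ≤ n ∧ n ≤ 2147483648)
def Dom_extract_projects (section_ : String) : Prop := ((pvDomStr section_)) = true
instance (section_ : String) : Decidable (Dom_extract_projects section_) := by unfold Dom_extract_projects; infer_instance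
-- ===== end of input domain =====

-- B segments the cleaned lines by precomputed title spans (dropWhile/takeWhile) instead of A's single pass mutating the last dict's description; same cost, alternative decomposition.


-- ===== PORT A =====
-- current["description"] += " " + l  on the assoc list: update the first "description" entry
def aSetDesc : List (String × String) → String → List (String × String)
  | [], _ => []
  | (k, v) :: rest, l => if k = "description" then (k, v ++ (" " ++ l)) :: rest else (k, v) :: aSetDesc rest l

-- 'current' aliases result[-1] (set exactly when result is nonempty): append to the last dict
def aBump : List (List (String × String)) → String → List (List (String × String))
  | [], _ => []
  | [p], l => [aSetDesc p l]
  | p :: q :: rest, l => p :: aBump (q :: rest) l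

def aStep (acc : List (List (String × String))) (l : String) : List (List (String × String)) :=
  if (PySem.Str.split₀ l).length ≤ 10 then
    acc ++ [[("title", l), ("description", "")]]
  else
    aBump acc l

def extract_projects (section_ : String) : List (List (String × String)) :=
  let lines := ((PySem.Str.splitlines section_).filter
      (fun l => PySem.Str.strip l ≠ "")).map PySem.Str.strip
  lines.foldl aStep []

-- ===== PORT B =====
-- the inner while condition: len(l.split()) > 10
def bLong (l : String) : Bool := decide (10 < (PySem.Str.split₀ l).length)

-- " ".join(parts)
def bJoin : List String → String
  | [] => ""
  | [p] => p
  | p :: q :: rest => p ++ (" " ++ bJoin (q :: rest))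

-- the outer while loop: take a title, then the span of following long lines
def bSeg : List String → List (List (String × String))
  | [] => []
  | t :: rest =>
    let parts := rest.takeWhile bLong
    let rest' := rest.dropWhile bLong
    [("title", t), ("description", if parts = [] then "" else " " ++ bJoin parts)] :: bSeg rest'
  termination_by ls => ls.length
  decreasing_by
    have := List.length_dropWhile_le bLong rest
    simp only [List.length_cons]
    omega

def extract_projects_alt (section_ : String) : List (List (String × String)) :=
  let lines := ((PySem.Str.splitlines section_).filter
      (fun l => PySem.Str.strip l ≠ "")).map PySem.Str.strip
  bSeg (lines.dropWhile bLong)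

-- ===== PRECONDITION & SPEC =====
def Spec_extract_projects (section_ : String) (out : List (List (String × String))) : Prop := out = extract_projects_alt section_
instance (section_ : String) (out : List (List (String × String))) : Decidable (Spec_extract_projects section_ out) := by unfold Spec_extract_projects; infer_instance

-- ===== CLAIM (what is proved, stated in full; the proofs are below) =====
def Claim_equal_extract_projects : Prop := ∀ (section_ : String), Dom_extract_projects section_ → Spec_extract_projects section_ (extract_projects section_)

-- ===== LEMMAS AND PROOFS =====

-- proof-side helper: what A's bumps concatenate onto a description
def dcat : List String → String
  | [] => ""
  | l :: rest => (" " ++ l) ++ dcat rest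

theorem dcat_eq_join (ps : List String) :
    dcat ps = if ps = [] then "" else " " ++ bJoin ps := by
  induction ps with
  | nil => simp [dcat]
  | cons a rest ih =>
    cases rest with
    | nil => simp [dcat, bJoin, String.append_empty]
    | cons b rs =>
      simp only [dcat, if_neg (by simp : ¬ (b :: rs = []))] at ih
      simp only [dcat, bJoin, ih, if_neg (by simp : ¬ (a :: b :: rs = [])),
        String.append_assoc]

theorem aBump_append : ∀ (done : List (List (String × String)))
    (p : List (String × String)) (l : String),
    aBump (done ++ [p]) l = done ++ [aSetDesc p l] := by
  intro done
  induction done with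
  | nil => intro p l; simp [aBump]
  | cons q ds ih =>
    intro p l
    cases hd : ds ++ [p] with
    | nil => simp at hd
    | cons x xs =>
      have : aBump (q :: (ds ++ [p])) l = q :: aBump (ds ++ [p]) l := by
        rw [hd]; rfl
      simp [this, ih p l]

theorem aSetDesc_blk (t d l : String) :
    aSetDesc [("title", t), ("description", d)] l
      = [("title", t), ("description", d ++ (" " ++ l))] := by
  simp [aSetDesc]

theorem foldl_main (ls : List String) :
    ∀ (done : List (List (String × String))) (t d : String),
    ls.foldl aStep (done ++ [[("title", t), ("description", d)]])
      = done ++ [[("title", t), ("description", d ++ dcat (ls.takeWhile bLong))]]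
          ++ bSeg (ls.dropWhile bLong) := by
  induction ls with
  | nil =>
    intro done t d
    simp [dcat, bSeg, String.append_empty]
  | cons l rest ih =>
    intro done t d
    by_cases hl : (PySem.Str.split₀ l).length ≤ 10
    · -- l is a title: A opens a new block, B's dropWhile stops here
      have hb : bLong l = false := by simp [bLong]; omega
      have h1 : aStep (done ++ [[("title", t), ("description", d)]]) l
          = (done ++ [[("title", t), ("description", d)]]) ++ [[("title", l), ("description", "")]] := by
        simp [aStep, hl]
      simp only [List.foldl_cons, h1, ih]
      simp only [List.takeWhile_cons, List.dropWhile_cons, hb, Bool.false_eq_true,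
        ite_false, bSeg, dcat_eq_join, String.empty_append]
      simp
    · -- l is a long line: A bumps the last description
      have hb : bLong l = true := by simp [bLong]; omega
      have h1 : aStep (done ++ [[("title", t), ("description", d)]]) l
          = done ++ [[("title", t), ("description", d ++ (" " ++ l))]] := by
        simp only [aStep, if_neg hl, aBump_append, aSetDesc_blk]
      simp only [List.foldl_cons, h1, ih]
      simp only [List.takeWhile_cons, List.dropWhile_cons, hb, ite_true, dcat,
        String.append_assoc]

theorem foldl_nil (ls : List String) :
    ls.foldl aStep [] = bSeg (ls.dropWhile bLong) := by
  induction ls with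
  | nil => simp [bSeg]
  | cons l rest ih =>
    by_cases hl : (PySem.Str.split₀ l).length ≤ 10
    · have hb : bLong l = false := by simp [bLong]; omega
      have h1 : aStep [] l = [[("title", l), ("description", "")]] := by
        simp [aStep, hl]
      have h2 := foldl_main rest [] l ""
      simp only [List.nil_append, dcat_eq_join, String.empty_append] at h2
      simp only [List.foldl_cons, h1, h2, List.dropWhile_cons, hb,
        Bool.false_eq_true, ite_false, bSeg]
      simp
    · have hb : bLong l = true := by simp [bLong]; omega
      have h1 : aStep [] l = [] := by simp [aStep, hl, aBump]
      simp only [List.foldl_cons, h1, ih, List.dropWhile_cons, hb, ite_true]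

-- ===== VERDICT (by name: the statement is the Claim_ definition above) =====
theorem extract_projects_spec : Claim_equal_extract_projects := by
  intro s _
  unfold Spec_extract_projects extract_projects extract_projects_alt
  exact foldl_nil _
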